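-- pv_equiv track=rewrite | github.com/AaronMbuzi/Advent-of-code-2025 | Day 2/Part 2/solve.py | generate_repeated_numbers
-- ===== SOURCE A (Python) =====
-- def generate_repeated_numbers(max_value):
--     max_digits = len(str(max_value))
--     found = set()
--     # base length l from 1..max_digits-1 (must repeat at least twice)
--     for l in range(1, max_digits):
--         start = 10**(l-1)
--         end = 10**l - 1
--         max_k = max_digits // l
--         if max_k < 2:
--             continue
--         for s in range(start, end+1):
--             base = str(s)
--             for k in range(2, max_k+1):
--                 n = int(base * k)
--                 if n > max_value:
--                     break
--                 found.add(n)
--     return found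
-- ===== SOURCE B (Python) =====
-- def generate_repeated_numbers(max_value):
--     found = set()
--     b = 1
--     while True:
--         mult = 10 ** len(str(b))
--         n = b * mult + b
--         if n > max_value:
--             break
--         while n <= max_value:
--             found.add(n)
--             n = n * mult + b
--         b += 1
--     return found
-- ===== Notes on version B (the rewrite author's own statement) =====
-- stated objective: faster
-- what changed: Replaces A's digit-length-stratified triple loop (for every base length l below len(str(max_value)), scan all l-digit bases and re-parse int(str(base)*k) for each repetition count) by one flat loop over the base integer b that builds each repetition arithmetically (n = n*mult + b) and stops as soon as the two-copy value b*mult+b exceeds max_value, so only bases up to about sqrt(max_value) are visited and no string building/parsing is done.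
import Mathlib
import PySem

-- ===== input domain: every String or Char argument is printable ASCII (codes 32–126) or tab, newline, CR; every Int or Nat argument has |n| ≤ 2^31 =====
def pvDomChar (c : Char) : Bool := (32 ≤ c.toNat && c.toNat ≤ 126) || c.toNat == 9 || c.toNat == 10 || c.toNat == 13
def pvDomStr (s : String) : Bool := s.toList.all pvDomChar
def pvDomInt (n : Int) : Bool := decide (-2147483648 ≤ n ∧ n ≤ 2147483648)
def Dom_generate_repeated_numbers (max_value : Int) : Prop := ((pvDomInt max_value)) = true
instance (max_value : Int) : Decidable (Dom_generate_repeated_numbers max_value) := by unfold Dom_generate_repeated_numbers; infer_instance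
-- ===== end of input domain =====

set_option maxRecDepth 4000

-- B is a different algorithm: one flat loop over the base integer with arithmetic repetition
-- building (n = n*mult + b) and an early stop when the two-copy value exceeds max_value,
-- instead of A's base-length-stratified triple loop that re-parses int(str(base)*k).

-- ===== PORT A =====
-- inner 'for k in range(2, max_k + 1)' loop with its break, building the set
def pvARepLoop (max_value : Int) (base : List Char) (found : List Int) : List Int → List Int
  | [] => found
  | k :: ks =>
    -- n = int(base * k); int() on a nonempty digit string never raises, so getD's default is unreachable
    let n := (PySem.Int.ofChars? (PySem.List.pyRepeat base k)).getD 0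
    if n > max_value then found
    else pvARepLoop max_value base (PySem.Set.add found n) ks

def generate_repeated_numbers (max_value : Int) : List Int :=
  let max_digits : Int := PySem.List.len (PySem.Int.toChars max_value)
  (PySem.List.pyRange 1 max_digits).foldl
    (fun found l =>
      -- start/end/max_k as in A; (l-1).toNat/l.toNat are exact since 1 ≤ l inside the range
      let start : Int := 10 ^ (l - 1).toNat
      let stop : Int := 10 ^ l.toNat - 1
      let max_k : Int := PySem.Int.floordiv max_digits l
      if max_k < 2 then found   -- continue
      else
        (PySem.List.pyRange start (stop + 1)).foldl
          (fun found s =>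
            let base := PySem.Int.toChars s
            pvARepLoop max_value base found (PySem.List.pyRange 2 (max_k + 1)))
          found)
    []

-- ===== PORT B =====
-- inner 'while n <= max_value' loop; the extra conjunct 'n < n * mult + b' in the guard only
-- makes the recursion total (it always holds on reachable states, where mult ≥ 10 and b ≥ 1)
def pvAltInner (max_value mult b : Int) (found : List Int) (n : Int) : List Int :=
  if h : n ≤ max_value ∧ n < n * mult + b then
    pvAltInner max_value mult b (PySem.Set.add found n) (n * mult + b)
  else found
termination_by (max_value + 1 - n).toNat
decreasing_by omega

-- outer 'while True' loop over the base b; the conjuncts '0 < b' and '2 ≤ mult' in the guard only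
-- make the recursion total (they always hold on reachable states: b starts at 1 and mult = 10^len ≥ 10)
def pvAltOuter (max_value : Int) (found : List Int) (b : Int) : List Int :=
  let mult : Int := 10 ^ (PySem.Int.toChars b).length
  let n := b * mult + b
  if h : n ≤ max_value ∧ 0 < b ∧ 2 ≤ mult then
    pvAltOuter max_value (pvAltInner max_value mult b found n) (b + 1)
  else found
termination_by (max_value - b).toNat
decreasing_by
  obtain ⟨h1, h2, h3⟩ := h
  have h4 : 2 * b ≤ b * mult := by nlinarith
  omega

def generate_repeated_numbers_alt (max_value : Int) : List Int :=
  pvAltOuter max_value [] 1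

-- ===== PRECONDITION & SPEC =====
def Spec_generate_repeated_numbers (max_value : Int) (out : List Int) : Prop := out = generate_repeated_numbers_alt max_value
instance (max_value : Int) (out : List Int) : Decidable (Spec_generate_repeated_numbers max_value out) := by unfold Spec_generate_repeated_numbers; infer_instance

-- ===== CLAIM (what is proved, stated in full; the proofs are below) =====
def Claim_equal_generate_repeated_numbers : Prop := ∀ (max_value : Int), Dom_generate_repeated_numbers max_value → Spec_generate_repeated_numbers max_value (generate_repeated_numbers max_value)

-- ===== LEMMAS AND PROOFS =====

-- ---------- decimal digit strings and their parsed value ----------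

def pvVal (cs : List Char) : Nat := cs.foldl (fun a c => a * 10 + (c.toNat - '0'.toNat)) 0

lemma pv_dropWhile_digits (l : List Char) (h : ∀ x ∈ l, x.isDigit = true) :
    List.dropWhile PySem.Int.isIntSpace l = l := by
  cases l with
  | nil => rfl
  | cons c cs =>
    rw [List.dropWhile_cons, if_neg]
    have hc := h c (by simp)
    rw [Bool.not_eq_true]
    by_contra hne
    rw [Bool.not_eq_false] at hne
    simp only [PySem.Int.isIntSpace, Bool.or_eq_true, decide_eq_true_eq] at hne
    rcases hne with ((((rfl|rfl)|rfl)|rfl)|rfl)|rfl <;> exact absurd hc (by decide)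

lemma pv_go_bridge (F : List Char → Bool → Nat → Option Nat)
    (h1 : ∀ (c : Char) (rest : List Char) (b : Bool) (a : Nat), c.isDigit = true →
      F (c :: rest) b a = F rest true (a * 10 + (c.toNat - '0'.toNat)))
    (h0 : ∀ a : Nat, F [] true a = some a) :
    ∀ (cs : List Char) (acc : Nat), (∀ x ∈ cs, x.isDigit = true) →
      F cs true acc = some (cs.foldl (fun a c => a * 10 + (c.toNat - '0'.toNat)) acc) := by
  intro cs
  induction cs with
  | nil => intro acc _; simpa using h0 acc
  | cons c cs ih =>
    intro acc h
    rw [h1 c cs true acc (h c (by simp)), List.foldl_cons]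
    exact ih _ (fun x hx => h x (by simp [hx]))

lemma pv_parse_entry {G : List Char → Option Nat} {F : List Char → Bool → Nat → Option Nat}
    {D : Char → List Char → Option Nat}
    (hGF : ∀ (c : Char) (cs : List Char), G (c :: cs) =
      if c.isDigit = true then F cs true (0 * 10 + (c.toNat - '0'.toNat)) else D c cs)
    (h1 : ∀ (c : Char) (rest : List Char) (b : Bool) (a : Nat), c.isDigit = true →
      F (c :: rest) b a = F rest true (a * 10 + (c.toNat - '0'.toNat)))
    (h0 : ∀ a : Nat, F [] true a = some a)
    (c : Char) (cs : List Char) (h : ∀ x ∈ c :: cs, x.isDigit = true) :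
    Option.map (fun n : Int => n) (do let a ← G (c :: cs); pure ((a : Nat) : Int)) =
      some ((pvVal (c :: cs) : Nat) : Int) := by
  rw [hGF, if_pos (h c (by simp)),
    pv_go_bridge F h1 h0 cs _ (fun x hx => h x (by simp [hx]))]
  simp [pvVal]

lemma pv_digit_cases (c : Char) (h : c.isDigit = true) :
    c = '0' ∨ c = '1' ∨ c = '2' ∨ c = '3' ∨ c = '4' ∨ c = '5' ∨ c = '6' ∨ c = '7' ∨ c = '8' ∨ c = '9' := by
  simp only [Char.isDigit, ge_iff_le, Bool.and_eq_true, decide_eq_true_eq] at h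
  obtain ⟨h1, h2⟩ := h
  rw [UInt32.le_iff_toNat_le] at h1 h2
  have e := Char.ofNat_toNat c
  have hb : 48 ≤ c.toNat ∧ c.toNat ≤ 57 := by
    constructor
    · simpa using h1
    · simpa using h2
  have hd : c.toNat = 48 ∨ c.toNat = 49 ∨ c.toNat = 50 ∨ c.toNat = 51 ∨ c.toNat = 52 ∨
      c.toNat = 53 ∨ c.toNat = 54 ∨ c.toNat = 55 ∨ c.toNat = 56 ∨ c.toNat = 57 := by omega
  rcases hd with hx|hx|hx|hx|hx|hx|hx|hx|hx|hx <;> rw [hx] at e <;>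
    simp only [← e] <;> decide

-- int(s) on a nonempty string of decimal digits returns its value
lemma pv_parse_digits (c : Char) (cs : List Char) (h : ∀ x ∈ c :: cs, x.isDigit = true) :
    PySem.Int.ofChars? (c :: cs) = some ((pvVal (c :: cs) : Nat) : Int) := by
  have hrev : ∀ x ∈ (c :: cs).reverse, x.isDigit = true := by
    intro x hx; exact h x (List.mem_reverse.mp hx)
  have hc := h c (by simp)
  unfold PySem.Int.ofChars?
  rw [pv_dropWhile_digits _ h, pv_dropWhile_digits _ hrev, List.reverse_reverse]
  rcases pv_digit_cases c hc with rfl|rfl|rfl|rfl|rfl|rfl|rfl|rfl|rfl|rfl <;>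
    all_goals refine pv_parse_entry (F := ?_) (D := ?_) ?_ ?_ ?_ _ cs h
  all_goals try (intro c' cs'; rfl)
  all_goals try (intro c' rest b a hc'; exact if_pos hc')
  all_goals try (intro a; rfl)

-- ---------- str(n) : the digit list of a natural number ----------

def pvDstr (n : Nat) : List Char :=
  if h : n < 10 then [Nat.digitChar n]
  else pvDstr (n / 10) ++ [Nat.digitChar (n % 10)]
termination_by n
decreasing_by exact Nat.div_lt_self (by omega) (by omega)

lemma pv_toDigitsCore_eq (f : Nat) : ∀ (n : Nat) (acc : List Char), n < f →
    Nat.toDigitsCore 10 f n acc = pvDstr n ++ acc := by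
  induction f with
  | zero => intro n acc h; omega
  | succ f ih =>
    intro n acc h
    rw [Nat.toDigitsCore]
    by_cases h10 : n < 10
    · have : n / 10 = 0 := Nat.div_eq_of_lt h10
      simp only [this, reduceIte]
      rw [pvDstr, dif_pos h10, Nat.mod_eq_of_lt h10]
      rfl
    · have hne : ¬ n / 10 = 0 := by
        intro hz
        have := Nat.div_eq_of_lt (show n < 10 from by
          by_contra hh
          have := Nat.div_le_div_right (c := 10) (show 10 ≤ n by omega)
          simp at this
          omega)
        omega
      simp only [if_neg hne]
      have hlt : n / 10 < n := Nat.div_lt_self (by omega) (by omega)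
      rw [ih (n / 10) _ (by omega)]
      conv_rhs => rw [pvDstr]
      rw [dif_neg h10]
      simp

lemma pv_toDigits_eq (n : Nat) : Nat.toDigits 10 n = pvDstr n := by
  unfold Nat.toDigits
  rw [pv_toDigitsCore_eq (n + 1) n [] (by omega)]
  simp

lemma pv_toChars_nonneg (s : Int) (h : 0 ≤ s) : PySem.Int.toChars s = pvDstr s.toNat := by
  unfold PySem.Int.toChars
  rw [if_neg (by omega), pv_toDigits_eq]

lemma pv_digitChar_isDigit (d : Nat) (h : d < 10) : (Nat.digitChar d).isDigit = true := by
  interval_cases d <;> decide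

lemma pv_digitChar_toNat (d : Nat) (h : d < 10) : (Nat.digitChar d).toNat - 48 = d := by
  interval_cases d <;> decide

lemma pvDstr_digits (n : Nat) : ∀ c ∈ pvDstr n, c.isDigit = true := by
  induction n using Nat.strong_induction_on with
  | _ n ih =>
    rw [pvDstr]
    by_cases h : n < 10
    · rw [dif_pos h]
      intro c hc
      simp at hc
      subst hc
      exact pv_digitChar_isDigit n h
    · rw [dif_neg h]
      intro c hc
      rw [List.mem_append] at hc
      rcases hc with hc | hc
      · exact ih (n / 10) (Nat.div_lt_self (by omega) (by omega)) c hc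
      · simp at hc
        subst hc
        exact pv_digitChar_isDigit _ (Nat.mod_lt _ (by omega))

lemma pvDstr_ne_nil (n : Nat) : pvDstr n ≠ [] := by
  rw [pvDstr]
  by_cases h : n < 10
  · rw [dif_pos h]; simp
  · rw [dif_neg h]; simp

lemma pvDstr_len_pos (n : Nat) : 1 ≤ (pvDstr n).length := by
  have := pvDstr_ne_nil n
  cases hx : pvDstr n with
  | nil => exact absurd hx this
  | cons a l => simp

-- parsed value with a nonzero accumulator
lemma pvVal_foldl (cs : List Char) : ∀ acc : Nat,
    cs.foldl (fun a c => a * 10 + (c.toNat - '0'.toNat)) acc = acc * 10 ^ cs.length + pvVal cs := by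
  induction cs with
  | nil => intro acc; simp [pvVal]
  | cons c cs ih =>
    intro acc
    rw [List.foldl_cons, ih]
    have h2 : pvVal (c :: cs) = (c.toNat - '0'.toNat) * 10 ^ cs.length + pvVal cs := by
      have h3 := ih (0 * 10 + (c.toNat - '0'.toNat))
      simpa [pvVal] using h3
    rw [h2, List.length_cons, pow_succ]
    ring

lemma pvVal_append (xs ys : List Char) :
    pvVal (xs ++ ys) = pvVal xs * 10 ^ ys.length + pvVal ys := by
  unfold pvVal
  rw [List.foldl_append]
  exact pvVal_foldl ys _

lemma pvVal_dstr (n : Nat) : pvVal (pvDstr n) = n := by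
  induction n using Nat.strong_induction_on with
  | _ n ih =>
    rw [pvDstr]
    by_cases h : n < 10
    · rw [dif_pos h]
      simp only [pvVal, List.foldl_cons, List.foldl_nil, Nat.zero_mul, Nat.zero_add]
      exact pv_digitChar_toNat n h
    · rw [dif_neg h]
      rw [pvVal_append]
      rw [ih (n / 10) (Nat.div_lt_self (by omega) (by omega))]
      have hone : pvVal [Nat.digitChar (n % 10)] = n % 10 := by
        simp only [pvVal, List.foldl_cons, List.foldl_nil, Nat.zero_mul, Nat.zero_add]
        exact pv_digitChar_toNat _ (Nat.mod_lt _ (show 0 < 10 by omega))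
      rw [hone]
      simp
      omega

lemma pvDstr_ub (n : Nat) : n < 10 ^ (pvDstr n).length := by
  induction n using Nat.strong_induction_on with
  | _ n ih =>
    rw [pvDstr]
    by_cases h : n < 10
    · rw [dif_pos h]; simpa using h
    · rw [dif_neg h]
      have h1 := ih (n / 10) (Nat.div_lt_self (by omega) (by omega))
      simp only [List.length_append, List.length_cons, List.length_nil]
      have h2 : n = 10 * (n / 10) + n % 10 := (Nat.div_add_mod n 10).symm.trans (by ring_nf)
      have h3 : n % 10 < 10 := Nat.mod_lt _ (by omega)
      have h4 : 10 ^ ((pvDstr (n / 10)).length + 1) = 10 * 10 ^ (pvDstr (n / 10)).length := by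
        rw [pow_succ]; ring
      rw [zero_add, h4]
      omega

lemma pvDstr_lb (n : Nat) (h : 1 ≤ n) : 10 ^ ((pvDstr n).length - 1) ≤ n := by
  induction n using Nat.strong_induction_on with
  | _ n ih =>
    rw [pvDstr]
    by_cases h10 : n < 10
    · rw [dif_pos h10]; simpa using h
    · rw [dif_neg h10]
      have hq : 1 ≤ n / 10 := by omega
      have h1 := ih (n / 10) (Nat.div_lt_self (by omega) (by omega)) hq
      have hlp := pvDstr_len_pos (n / 10)
      simp only [List.length_append, List.length_cons, List.length_nil, zero_add]
      have h4 : 10 ^ ((pvDstr (n / 10)).length + 1 - 1) = 10 * 10 ^ ((pvDstr (n / 10)).length - 1) := by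
        have : (pvDstr (n / 10)).length + 1 - 1 = ((pvDstr (n / 10)).length - 1) + 1 := by omega
        rw [this, pow_succ]; ring
      rw [h4]
      omega

-- ---------- Int-side digit-length facts ----------

def pvMult (b : Int) : Int := 10 ^ (PySem.Int.toChars b).length

lemma pv_len_toChars_pos (b : Int) : 1 ≤ (PySem.Int.toChars b).length := by
  unfold PySem.Int.toChars
  by_cases h : b < 0
  · rw [if_pos h]; simp
  · rw [if_neg h, pv_toDigits_eq]; exact pvDstr_len_pos _

lemma pvMult_ge10 (b : Int) : 10 ≤ pvMult b := by
  unfold pvMult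
  calc (10:Int) = 10 ^ 1 := (pow_one _).symm
  _ ≤ 10 ^ (PySem.Int.toChars b).length :=
      pow_le_pow_right₀ (by norm_num) (pv_len_toChars_pos b)

lemma pv_toChars_lb (s : Int) (hs : 1 ≤ s) :
    (10:Int) ^ ((PySem.Int.toChars s).length - 1) ≤ s := by
  rw [pv_toChars_nonneg s (by omega)]
  have h := pvDstr_lb s.toNat (by omega)
  have h2 : ((10 ^ ((pvDstr s.toNat).length - 1) : Nat) : Int) ≤ ((s.toNat : Nat) : Int) := by
    exact_mod_cast h
  rw [Int.toNat_of_nonneg (by omega)] at h2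
  simpa using h2

lemma pv_toChars_ub (s : Int) (hs : 0 ≤ s) :
    s < (10:Int) ^ (PySem.Int.toChars s).length := by
  rw [pv_toChars_nonneg s hs]
  have h := pvDstr_ub s.toNat
  have h2 : ((s.toNat : Nat) : Int) < ((10 ^ (pvDstr s.toNat).length : Nat) : Int) := by
    exact_mod_cast h
  rw [Int.toNat_of_nonneg hs] at h2
  simpa using h2

lemma pv_toChars_len_eq (s : Int) (l : Nat) (hl : 1 ≤ l)
    (h1 : (10:Int) ^ (l - 1) ≤ s) (h2 : s < (10:Int) ^ l) :
    (PySem.Int.toChars s).length = l := by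
  have hpow : (0:Int) < 10 ^ (l - 1) := pow_pos (by norm_num) _
  have hs : 1 ≤ s := by omega
  have lb := pv_toChars_lb s hs
  have ub := pv_toChars_ub s (by omega)
  have lp := pv_len_toChars_pos s
  set L := (PySem.Int.toChars s).length with hL
  rcases lt_trichotomy L l with hlt | heq | hgt
  · exfalso
    have : (10:Int) ^ L ≤ 10 ^ (l - 1) := pow_le_pow_right₀ (by norm_num) (by omega)
    omega
  · exact heq
  · exfalso
    have : (10:Int) ^ l ≤ 10 ^ (L - 1) := pow_le_pow_right₀ (by norm_num) (by omega)
    omega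

lemma pv_len_mono (x y : Int) (hx : 1 ≤ x) (hxy : x ≤ y) :
    (PySem.Int.toChars x).length ≤ (PySem.Int.toChars y).length := by
  by_contra hne
  have hlb := pv_toChars_lb x hx
  have hub := pv_toChars_ub y (by omega)
  have hlp := pv_len_toChars_pos y
  have : (10:Int) ^ (PySem.Int.toChars y).length ≤ 10 ^ ((PySem.Int.toChars x).length - 1) :=
    pow_le_pow_right₀ (by norm_num) (by omega)
  omega

lemma pv_stop_mono (mx x y : Int) (hx : 1 ≤ x) (hxy : x ≤ y)
    (h : mx < x * pvMult x + x) : mx < y * pvMult y + y := by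
  have hm : pvMult x ≤ pvMult y := by
    unfold pvMult
    exact pow_le_pow_right₀ (by norm_num) (pv_len_mono x y hx hxy)
  have h0 : (0:Int) ≤ pvMult x := le_trans (by norm_num) (pvMult_ge10 x)
  have : x * pvMult x ≤ y * pvMult y :=
    mul_le_mul hxy hm h0 (by omega)
  omega

-- ---------- the repetition value and the parse of str(s) * k ----------

def pvRepV (b mult : Int) : Nat → Int
  | 0 => b
  | j + 1 => pvRepV b mult j * mult + b

lemma pvRepV_lb (b mult : Int) (hb : 1 ≤ b) (hm : 1 ≤ mult) :
    ∀ j, b * mult ^ j ≤ pvRepV b mult j := by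
  intro j
  induction j with
  | zero => simp [pvRepV]
  | succ j ih =>
    show b * mult ^ (j + 1) ≤ pvRepV b mult j * mult + b
    have h1 : b * mult ^ (j + 1) = (b * mult ^ j) * mult := by ring
    have h2 : (b * mult ^ j) * mult ≤ pvRepV b mult j * mult :=
      mul_le_mul_of_nonneg_right ih (by omega)
    omega

lemma pvRepV_pos (b mult : Int) (hb : 1 ≤ b) (hm : 1 ≤ mult) (j : Nat) :
    1 ≤ pvRepV b mult j := by
  have h1 := pvRepV_lb b mult hb hm j
  have h2 : (1:Int) ≤ mult ^ j := one_le_pow₀ hm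
  nlinarith

lemma pvVal_rep (m : Nat) (hm : 1 ≤ m) :
    ∀ K, 1 ≤ K → ((pvVal ((List.replicate K (pvDstr m)).flatten) : Nat) : Int) =
      pvRepV (m : Int) ((10:Int) ^ (pvDstr m).length) (K - 1) := by
  intro K
  induction K with
  | zero => omega
  | succ K ih =>
    intro _
    by_cases hK : K = 0
    · subst hK
      simp [pvVal_dstr, pvRepV]
    · rw [List.replicate_succ', List.flatten_append]
      have h1 : (List.replicate K (pvDstr m)).flatten ++ [pvDstr m].flatten =
          (List.replicate K (pvDstr m)).flatten ++ pvDstr m := by simp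
      rw [h1, pvVal_append, pvVal_dstr]
      have h2 := ih (by omega)
      have h3 : K + 1 - 1 = (K - 1) + 1 := by omega
      rw [h3]
      show (((pvVal ((List.replicate K (pvDstr m)).flatten)) * 10 ^ (pvDstr m).length + m : Nat) : Int) =
        pvRepV (m : Int) ((10:Int) ^ (pvDstr m).length) (K - 1) * 10 ^ (pvDstr m).length + (m : Int)
      push_cast
      rw [h2]

lemma pvMult_eq_nonneg (s : Int) (h : 0 ≤ s) :
    pvMult s = (10:Int) ^ (pvDstr s.toNat).length := by
  unfold pvMult
  rw [pv_toChars_nonneg s h]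

-- the value A computes with n = int(str(s) * k)
lemma pv_parse_getD (s k : Int) (hs : 1 ≤ s) (hk : 1 ≤ k) :
    (PySem.Int.ofChars? (PySem.List.pyRepeat (PySem.Int.toChars s) k)).getD 0 =
      pvRepV s (pvMult s) (k.toNat - 1) := by
  rw [pv_toChars_nonneg s (by omega)]
  simp only [PySem.List.pyRepeat]
  have hK : 1 ≤ k.toNat := by omega
  have hm : 1 ≤ s.toNat := by omega
  obtain ⟨c, cs', hds⟩ : ∃ c cs', pvDstr s.toNat = c :: cs' := by
    cases hx : pvDstr s.toNat with
    | nil => exact absurd hx (pvDstr_ne_nil _)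
    | cons a l => exact ⟨a, l, rfl⟩
  have hsh : (List.replicate k.toNat (pvDstr s.toNat)).flatten =
      c :: (cs' ++ (List.replicate (k.toNat - 1) (pvDstr s.toNat)).flatten) := by
    obtain ⟨K', hK'⟩ : ∃ K', k.toNat = K' + 1 := ⟨k.toNat - 1, by omega⟩
    rw [hK', List.replicate_succ, List.flatten_cons, hds]
    simp [hK']
  rw [hsh]
  have hdig : ∀ x ∈ c :: (cs' ++ (List.replicate (k.toNat - 1) (pvDstr s.toNat)).flatten),
      x.isDigit = true := by
    intro x hx
    rw [← hsh] at hx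
    rw [List.mem_flatten] at hx
    obtain ⟨l, hl, hxl⟩ := hx
    rw [List.mem_replicate] at hl
    rw [hl.2] at hxl
    exact pvDstr_digits _ x hxl
  rw [pv_parse_digits c _ hdig, Option.getD_some, ← hsh, pvMult_eq_nonneg s (by omega)]
  have h5 := pvVal_rep s.toNat hm k.toNat hK
  rw [Int.toNat_of_nonneg (show (0:Int) ≤ s by omega)] at h5
  exact h5

-- ---------- the per-base chain of repetition values ----------

def pvChain (mx mult b n : Int) : List Int :=
  if h : n ≤ mx ∧ n < n * mult + b then n :: pvChain mx mult b (n * mult + b) else []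
termination_by (mx + 1 - n).toNat
decreasing_by omega

def pvContrib (mx b : Int) : List Int := pvChain mx (pvMult b) b (b * pvMult b + b)

lemma pv_chain_nil {mx mult b n : Int} (h : mx < n) : pvChain mx mult b n = [] := by
  rw [pvChain, dif_neg]
  intro hc
  omega

lemma pv_chain_cons {mx mult b n : Int} (h1 : n ≤ mx) (hb : 1 ≤ b) (hm : 2 ≤ mult)
    (hn : 1 ≤ n) : pvChain mx mult b n = n :: pvChain mx mult b (n * mult + b) := by
  rw [pvChain, dif_pos]
  refine ⟨h1, ?_⟩
  have : 2 * n ≤ n * mult := by nlinarith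
  omega

lemma pv_contrib_nil {mx b : Int} (h : mx < b * pvMult b + b) : pvContrib mx b = [] := by
  unfold pvContrib
  exact pv_chain_nil h

lemma pv_altInner_eq (mx mult b : Int) (found : List Int) (n : Int) :
    pvAltInner mx mult b found n = List.foldl PySem.Set.add found (pvChain mx mult b n) := by
  fun_induction pvAltInner mx mult b found n with
  | case1 found n h ih =>
    rw [pvChain, dif_pos h]
    simpa using ih
  | case2 found n h =>
    rw [pvChain, dif_neg h]
    rfl

-- ---------- generic fold-over-blocks helpers ----------

lemma pv_foldl_blocks (g : Int → List Int) (f : List Int → Int → List Int) :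
    ∀ (xs : List Int) (fd : List Int),
      (∀ (fd' : List Int) (s : Int), s ∈ xs → f fd' s = List.foldl PySem.Set.add fd' (g s)) →
      xs.foldl f fd = List.foldl PySem.Set.add fd (xs.flatMap g) := by
  intro xs
  induction xs with
  | nil => intro fd _; simp
  | cons x xs ih =>
    intro fd h
    rw [List.foldl_cons, List.flatMap_cons, List.foldl_append, h fd x (by simp)]
    exact ih _ (fun fd' s hs => h fd' s (by simp [hs]))

lemma pv_foldl_nil_blocks (g : Int → List Int) (xs : List Int) (fd : List Int)
    (h : ∀ x ∈ xs, g x = []) :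
    List.foldl PySem.Set.add fd (xs.flatMap g) = fd := by
  have : xs.flatMap g = [] := by
    rw [List.flatMap_eq_nil_iff]
    exact h
  rw [this]
  rfl

-- ---------- A's inner k-loop produces the chain ----------

lemma pv_aInner (mx s maxk : Int) (hs : 1 ≤ s) (hmk : 2 ≤ maxk)
    (HK : mx < pvRepV s (pvMult s) maxk.toNat) :
    ∀ (c : Nat) (j : Int) (found : List Int), 2 ≤ j → j + (c : Int) = maxk + 1 →
      pvARepLoop mx (PySem.Int.toChars s) found (PySem.List.pyRange j (maxk + 1)) =
        List.foldl PySem.Set.add found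
          (pvChain mx (pvMult s) s (pvRepV s (pvMult s) (j.toNat - 1))) := by
  intro c
  induction c with
  | zero =>
    intro j found h2 hsum
    have hj : j = maxk + 1 := by omega
    subst hj
    rw [PySem.List.pyRange_one_eq_nil (le_refl _)]
    have hidx : (maxk + 1).toNat - 1 = maxk.toNat := by omega
    rw [hidx, pv_chain_nil HK]
    rfl
  | succ c ih =>
    intro j found h2 hsum
    have hjlt : j < maxk + 1 := by omega
    rw [PySem.List.pyRange_one_cons hjlt]
    simp only [pvARepLoop]
    rw [pv_parse_getD s j hs (by omega)]
    have h10 : 10 ≤ pvMult s := pvMult_ge10 s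
    have hnp : 1 ≤ pvRepV s (pvMult s) (j.toNat - 1) := pvRepV_pos s (pvMult s) hs (by omega) _
    by_cases hn : pvRepV s (pvMult s) (j.toNat - 1) > mx
    · rw [if_pos hn, pv_chain_nil hn]
      rfl
    · rw [if_neg hn, pv_chain_cons (by omega) hs (by omega) hnp, List.foldl_cons]
      have hrec := ih (j + 1) (PySem.Set.add found (pvRepV s (pvMult s) (j.toNat - 1)))
        (by omega) (by omega)
      have hidx : (j + 1).toNat - 1 = (j.toNat - 1) + 1 := by omega
      rw [hidx] at hrec
      exact hrec

lemma pv_aRep (mx s maxk : Int) (found : List Int) (hs : 1 ≤ s) (hmk : 2 ≤ maxk)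
    (HK : mx < pvRepV s (pvMult s) maxk.toNat) :
    pvARepLoop mx (PySem.Int.toChars s) found (PySem.List.pyRange 2 (maxk + 1)) =
      List.foldl PySem.Set.add found (pvContrib mx s) := by
  have h := pv_aInner mx s maxk hs hmk HK (maxk - 1).toNat 2 found (le_refl _) (by omega)
  have hidx : ((2:Int).toNat - 1) = 1 := by omega
  rw [hidx] at h
  have hrep : pvRepV s (pvMult s) 1 = s * pvMult s + s := by
    show pvRepV s (pvMult s) 0 * pvMult s + s = s * pvMult s + s
    rfl
  rw [hrep] at h
  exact h

-- ---------- bounds used to cut both iterations at the same canonical range ----------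

lemma pv_mx_lt (mx : Int) : mx < (10:Int) ^ (PySem.Int.toChars mx).length := by
  rcases (show 0 ≤ mx ∨ mx < 0 by omega) with h | h
  · exact pv_toChars_ub mx h
  · have hp : (0:Int) < 10 ^ (PySem.Int.toChars mx).length := pow_pos (by norm_num) _
    omega

lemma pv_block_facts (s : Int) (jN : Nat) (hjN : 1 ≤ jN)
    (hlo : (10:Int) ^ (jN - 1) ≤ s) (hhi : s < (10:Int) ^ jN) :
    1 ≤ s ∧ pvMult s = (10:Int) ^ jN := by
  have hp : (0:Int) < 10 ^ (jN - 1) := pow_pos (by norm_num) _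
  have hs : 1 ≤ s := by omega
  have hlen := pv_toChars_len_eq s jN hjN hlo hhi
  refine ⟨hs, ?_⟩
  unfold pvMult
  rw [hlen]

lemma pv_twocopy_big (mx x : Int) (jN M : Nat)
    (hlo : (10:Int) ^ (jN - 1) ≤ x) (hmult : pvMult x = 10 ^ jN) (hx : 1 ≤ x)
    (hmx : mx < (10:Int) ^ M) (hMle : M ≤ jN - 1 + jN) :
    mx < x * pvMult x + x := by
  rw [hmult]
  have h1 : (10:Int) ^ (jN - 1) * 10 ^ jN ≤ x * 10 ^ jN :=
    mul_le_mul_of_nonneg_right hlo (by positivity)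
  rw [← pow_add] at h1
  have h2 : (10:Int) ^ M ≤ 10 ^ (jN - 1 + jN) := pow_le_pow_right₀ (by norm_num) hMle
  omega

lemma pv_HK (mx s : Int) (jN mkN M : Nat)
    (hlo : (10:Int) ^ (jN - 1) ≤ s) (hmult : pvMult s = 10 ^ jN) (hs : 1 ≤ s)
    (hmx : mx < (10:Int) ^ M) (hMle : M ≤ jN - 1 + jN * mkN) :
    mx < pvRepV s (pvMult s) mkN := by
  have hm1 : (1:Int) ≤ pvMult s := by linarith [pvMult_ge10 s]
  have lb := pvRepV_lb s (pvMult s) hs hm1 mkN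
  rw [hmult] at lb
  have hpm : ((10:Int) ^ jN) ^ mkN = 10 ^ (jN * mkN) := by rw [← pow_mul]
  rw [hpm] at lb
  have h1 : (10:Int) ^ (jN - 1) * 10 ^ (jN * mkN) ≤ s * 10 ^ (jN * mkN) :=
    mul_le_mul_of_nonneg_right hlo (by positivity)
  rw [← pow_add] at h1
  have h2 : (10:Int) ^ M ≤ 10 ^ (jN - 1 + jN * mkN) := pow_le_pow_right₀ (by norm_num) hMle
  rw [hmult]
  omega

-- ---------- A's whole computation reaches the canonical fold ----------

def pvABody (mx : Int) : List Int → Int → List Int := fun found l =>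
  if PySem.Int.floordiv (PySem.List.len (PySem.Int.toChars mx)) l < 2 then found
  else
    (PySem.List.pyRange ((10:Int) ^ (l - 1).toNat) ((10:Int) ^ l.toNat - 1 + 1)).foldl
      (fun found s =>
        pvARepLoop mx (PySem.Int.toChars s) found
          (PySem.List.pyRange 2 (PySem.Int.floordiv (PySem.List.len (PySem.Int.toChars mx)) l + 1)))
      found

lemma pv_A_eq (mx : Int) :
    generate_repeated_numbers mx =
      (PySem.List.pyRange 1 (PySem.List.len (PySem.Int.toChars mx))).foldl (pvABody mx) [] := rfl

lemma pv_aBlock (mx : Int) (M : Nat) (hM : M = (PySem.Int.toChars mx).length)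
    (hmx : mx < (10:Int) ^ M) (j : Int) (found : List Int) (h1 : 1 ≤ j) (hjM : j.toNat < M) :
    pvABody mx found j =
      List.foldl PySem.Set.add found
        ((PySem.List.pyRange ((10:Int) ^ (j.toNat - 1)) ((10:Int) ^ j.toNat)).flatMap
          (pvContrib mx)) := by
  have hlen : PySem.List.len (PySem.Int.toChars mx) = (M : Int) := by
    rw [hM]; rfl
  have hjpos : (0:Int) < j := by omega
  have hjN1 : 1 ≤ j.toNat := by omega
  have hst : ((10:Int) ^ (j - 1).toNat) = 10 ^ (j.toNat - 1) := by congr 1; omega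
  have hen : ((10:Int) ^ j.toNat - 1 + 1) = 10 ^ j.toNat := by ring
  unfold pvABody
  rw [hlen, hst, hen]
  by_cases hk : PySem.Int.floordiv (M:Int) j < 2
  · rw [if_pos hk]
    have hM2j : (M:Int) < 2 * j := (PySem.Int.floordiv_lt_iff_lt_mul hjpos).mp hk
    have hMle : M ≤ j.toNat - 1 + j.toNat := by omega
    have hnil : ∀ x ∈ PySem.List.pyRange ((10:Int) ^ (j.toNat - 1)) ((10:Int) ^ j.toNat),
        pvContrib mx x = [] := by
      intro x hx
      rw [PySem.List.mem_pyRange_one] at hx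
      obtain ⟨hs, hmult⟩ := pv_block_facts x j.toNat hjN1 hx.1 hx.2
      exact pv_contrib_nil (pv_twocopy_big mx x j.toNat M hx.1 hmult hs hmx hMle)
    rw [pv_foldl_nil_blocks _ _ _ hnil]
  · rw [if_neg hk]
    have hk2 : 2 ≤ PySem.Int.floordiv (M:Int) j := by omega
    apply pv_foldl_blocks
    intro fd' x hx
    rw [PySem.List.mem_pyRange_one] at hx
    obtain ⟨hs, hmult⟩ := pv_block_facts x j.toNat hjN1 hx.1 hx.2
    apply pv_aRep mx x (PySem.Int.floordiv (M:Int) j) fd' hs hk2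
    have hup : (M:Int) < (PySem.Int.floordiv (M:Int) j + 1) * j :=
      (PySem.Int.floordiv_lt_iff_lt_mul hjpos).mp (by omega)
    have hMle : M ≤ j.toNat - 1 + j.toNat * (PySem.Int.floordiv (M:Int) j).toNat := by
      have hcast : (((PySem.Int.floordiv (M:Int) j).toNat : Int)) = PySem.Int.floordiv (M:Int) j :=
        Int.toNat_of_nonneg (by omega)
      have hjc : ((j.toNat : Int)) = j := Int.toNat_of_nonneg (by omega)
      have h2 : (M:Int) < (((PySem.Int.floordiv (M:Int) j).toNat : Int) + 1) * (j.toNat : Int) := by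
        rw [hcast, hjc]; exact hup
      have h3 : M < ((PySem.Int.floordiv (M:Int) j).toNat + 1) * j.toNat := by exact_mod_cast h2
      have h4 : ((PySem.Int.floordiv (M:Int) j).toNat + 1) * j.toNat =
          j.toNat * (PySem.Int.floordiv (M:Int) j).toNat + j.toNat := by ring
      omega
    exact pv_HK mx x j.toNat (PySem.Int.floordiv (M:Int) j).toNat M hx.1 hmult hs hmx hMle

lemma pv_aOuter (mx : Int) (M : Nat) (hM : M = (PySem.Int.toChars mx).length)
    (hmx : mx < (10:Int) ^ M) :
    ∀ (c : Nat) (j : Int) (found : List Int), 1 ≤ j → j + (c : Int) = (M : Int) →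
      (PySem.List.pyRange j (M : Int)).foldl (pvABody mx) found =
        List.foldl PySem.Set.add found
          ((PySem.List.pyRange ((10:Int) ^ (j.toNat - 1)) ((10:Int) ^ (M - 1))).flatMap
            (pvContrib mx)) := by
  intro c
  induction c with
  | zero =>
    intro j found h1 hsum
    have hj : j = (M : Int) := by omega
    subst hj
    have hidx : ((M:Int).toNat - 1) = M - 1 := by omega
    rw [hidx, PySem.List.pyRange_one_eq_nil (le_refl _), PySem.List.pyRange_one_eq_nil (le_refl _)]
    rfl
  | succ c ih =>
    intro j found h1 hsum
    have hjlt : j < (M : Int) := by omega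
    have hjNM : j.toNat < M := by omega
    rw [PySem.List.pyRange_one_cons hjlt, List.foldl_cons]
    have hsplit : PySem.List.pyRange ((10:Int) ^ (j.toNat - 1)) ((10:Int) ^ (M - 1)) =
        PySem.List.pyRange ((10:Int) ^ (j.toNat - 1)) ((10:Int) ^ j.toNat) ++
          PySem.List.pyRange ((10:Int) ^ j.toNat) ((10:Int) ^ (M - 1)) :=
      PySem.List.pyRange_one_append _ _ _
        (pow_le_pow_right₀ (by norm_num) (by omega))
        (pow_le_pow_right₀ (by norm_num) (by omega))
    rw [hsplit, List.flatMap_append, List.foldl_append]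
    rw [pv_aBlock mx M hM hmx j found h1 hjNM]
    have hrec := ih (j + 1)
      (List.foldl PySem.Set.add found
        ((PySem.List.pyRange ((10:Int) ^ (j.toNat - 1)) ((10:Int) ^ j.toNat)).flatMap
          (pvContrib mx)))
      (by omega) (by omega)
    have hidx : (j + 1).toNat - 1 = j.toNat := by omega
    rw [hidx] at hrec
    exact hrec

-- ---------- B's whole computation reaches the same canonical fold ----------

lemma pv_altOuter_unfold (mx : Int) (found : List Int) (b : Int) :
    pvAltOuter mx found b =
      if b * pvMult b + b ≤ mx ∧ 0 < b ∧ 2 ≤ pvMult b then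
        pvAltOuter mx (pvAltInner mx (pvMult b) b found (b * pvMult b + b)) (b + 1)
      else found := by
  rw [pvAltOuter]
  simp only [pvMult]
  by_cases h : b * 10 ^ (PySem.Int.toChars b).length + b ≤ mx ∧ 0 < b ∧
      2 ≤ (10:Int) ^ (PySem.Int.toChars b).length
  · rw [dif_pos h, if_pos h]
  · rw [dif_neg h, if_neg h]

lemma pv_bOuter (mx N : Int)
    (HN : ∀ b', N < b' → 1 ≤ b' → mx < b' * pvMult b' + b') :
    ∀ (c : Nat) (b : Int) (found : List Int), 1 ≤ b → N + 1 - b ≤ (c : Int) →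
      pvAltOuter mx found b =
        List.foldl PySem.Set.add found ((PySem.List.pyRange b (N + 1)).flatMap (pvContrib mx)) := by
  intro c
  induction c with
  | zero =>
    intro b found hb hc
    have hstop := HN b (by omega) hb
    rw [pv_altOuter_unfold, if_neg (fun hg => absurd hg.1 (by omega))]
    rw [PySem.List.pyRange_one_eq_nil (by omega)]
    rfl
  | succ c ih =>
    intro b found hb hc
    rcases (show N < b ∨ b ≤ N by omega) with hbN | hbN
    · have hstop := HN b hbN hb
      rw [pv_altOuter_unfold, if_neg (fun hg => absurd hg.1 (by omega))]
      rw [PySem.List.pyRange_one_eq_nil (by omega)]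
      rfl
    · by_cases hg : b * pvMult b + b ≤ mx
      · rw [pv_altOuter_unfold,
          if_pos ⟨hg, by omega, by linarith [pvMult_ge10 b]⟩,
          pv_altInner_eq]
        rw [PySem.List.pyRange_one_cons (by omega : b < N + 1), List.flatMap_cons,
          List.foldl_append]
        exact ih (b + 1) _ (by omega) (by omega)
      · rw [pv_altOuter_unfold, if_neg (fun hh => hg hh.1)]
        have hnil : ∀ x ∈ PySem.List.pyRange b (N + 1), pvContrib mx x = [] := by
          intro x hx
          rw [PySem.List.mem_pyRange_one] at hx
          exact pv_contrib_nil (pv_stop_mono mx b x hb hx.1 (by omega))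
        rw [pv_foldl_nil_blocks _ _ _ hnil]

lemma pv_HN (mx : Int) (M : Nat) (hM : M = (PySem.Int.toChars mx).length)
    (hmx : mx < (10:Int) ^ M) :
    ∀ b', (10:Int) ^ (M - 1) - 1 < b' → 1 ≤ b' → mx < b' * pvMult b' + b' := by
  intro b' hb1 hb2
  have hb3 : (10:Int) ^ (M - 1) ≤ b' := by omega
  have hlenM : M ≤ (PySem.Int.toChars b').length := by
    by_contra hne
    have hub := pv_toChars_ub b' (by omega)
    have hle : (10:Int) ^ (PySem.Int.toChars b').length ≤ 10 ^ (M - 1) :=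
      pow_le_pow_right₀ (by norm_num) (by omega)
    omega
  have h1 : (10:Int) ^ M ≤ pvMult b' := by
    unfold pvMult
    exact pow_le_pow_right₀ (by norm_num) hlenM
  have h2 : pvMult b' ≤ b' * pvMult b' :=
    le_mul_of_one_le_left (by linarith [pvMult_ge10 b']) hb2
  omega

-- ===== VERDICT (by name: the statement is the Claim_ definition above) =====
theorem generate_repeated_numbers_spec : Claim_equal_generate_repeated_numbers := by
  unfold Claim_equal_generate_repeated_numbers
  intro mx _hdom
  unfold Spec_generate_repeated_numbers
  have hMpos : 1 ≤ (PySem.Int.toChars mx).length := pv_len_toChars_pos mx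
  have hmx : mx < (10:Int) ^ (PySem.Int.toChars mx).length := pv_mx_lt mx
  have hA : generate_repeated_numbers mx =
      List.foldl PySem.Set.add []
        ((PySem.List.pyRange 1 ((10:Int) ^ ((PySem.Int.toChars mx).length - 1))).flatMap
          (pvContrib mx)) := by
    have h := pv_aOuter mx (PySem.Int.toChars mx).length rfl hmx
      ((PySem.Int.toChars mx).length - 1) 1 [] (le_refl _) (by omega)
    have hidx : ((1:Int).toNat - 1) = 0 := by omega
    rw [hidx, pow_zero] at h
    rw [pv_A_eq mx]
    exact h
  have hB : generate_repeated_numbers_alt mx =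
      List.foldl PySem.Set.add []
        ((PySem.List.pyRange 1 ((10:Int) ^ ((PySem.Int.toChars mx).length - 1))).flatMap
          (pvContrib mx)) := by
    have hN := pv_HN mx (PySem.Int.toChars mx).length rfl hmx
    have hp : (0:Int) < 10 ^ ((PySem.Int.toChars mx).length - 1) := pow_pos (by norm_num) _
    have h := pv_bOuter mx ((10:Int) ^ ((PySem.Int.toChars mx).length - 1) - 1) hN
      ((10:Int) ^ ((PySem.Int.toChars mx).length - 1)).toNat 1 [] (le_refl _) (by omega)
    rw [sub_add_cancel] at h
    unfold generate_repeated_numbers_alt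
    exact h
  rw [hA, hB]
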